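-- pv_equiv track=rewrite | github.com/HaKietHung2905/text2sql_with_reasoning_system | utils_old/eval.py | _find_relevant_column
-- ===== SOURCE A (Python) =====
-- def _find_relevant_column(question, table, schema_info):
--     """Find the most relevant column based on question context"""
--     if table not in schema_info:
--         return '*'
--
--     question_lower = question.lower()
--     columns = schema_info[table]
--
--     # Look for columns mentioned in question
--     for col in columns:
--         if col.lower() in question_lower:
--             return col
--
--     # Look for name columns
--     for col in columns:
--         if 'name' in col.lower():
--             return col
--
--     return columns[0] if columns else '*'
-- ===== SOURCE B (Python) =====
-- def _find_relevant_column(question, table, schema_info):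
--     """Rank every column by relevance score and select the best (first minimal)."""
--     if table not in schema_info:
--         return '*'
--
--     columns = schema_info[table]
--     if not columns:
--         return '*'
--
--     question_lower = question.lower()
--
--     def score(col):
--         col_lower = col.lower()
--         if col_lower in question_lower:
--             return 0
--         if 'name' in col_lower:
--             return 1
--         return 2
--
--     return min(columns, key=score)
-- ===== Notes on version B (the rewrite author's own statement) =====
-- stated objective: alternative
-- what changed: B replaces A's three staged returns (two sequential scans plus an indexed default) by a rank-and-select algorithm: each column gets a relevance score (0 mentioned, 1 name-like, 2 otherwise) and min(columns, key=score) picks the first minimal-score column.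
import Mathlib
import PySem

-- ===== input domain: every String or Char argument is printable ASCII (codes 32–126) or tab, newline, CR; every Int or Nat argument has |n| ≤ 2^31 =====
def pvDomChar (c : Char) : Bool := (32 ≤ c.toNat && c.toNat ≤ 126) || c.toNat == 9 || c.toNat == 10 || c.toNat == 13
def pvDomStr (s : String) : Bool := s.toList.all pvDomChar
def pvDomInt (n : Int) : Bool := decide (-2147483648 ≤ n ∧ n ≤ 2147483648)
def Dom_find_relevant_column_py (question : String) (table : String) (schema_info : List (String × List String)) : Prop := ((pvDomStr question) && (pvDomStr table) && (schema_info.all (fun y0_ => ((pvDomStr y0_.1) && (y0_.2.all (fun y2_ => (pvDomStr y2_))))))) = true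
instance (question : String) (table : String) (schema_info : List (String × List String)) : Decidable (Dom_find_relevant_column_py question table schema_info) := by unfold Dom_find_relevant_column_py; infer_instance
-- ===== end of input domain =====

-- B replaces A's staged scans by a rank-and-select algorithm: score each column
-- (0 mentioned in question, 1 contains 'name', 2 otherwise) and take
-- min(columns, key=score), which returns the first minimal-score column.

-- ===== PORT A =====
-- first loop: 'for col in columns: if col.lower() in question_lower: return col'
def pvALoop1 (ql : String) : List String → Option String
  | [] => none
  | col :: rest =>
      if PySem.Str.isIn (PySem.Str.lower col) ql then some col else pvALoop1 ql rest

-- second loop: 'for col in columns: if "name" in col.lower(): return col'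
def pvALoop2 : List String → Option String
  | [] => none
  | col :: rest =>
      if PySem.Str.isIn "name" (PySem.Str.lower col) then some col else pvALoop2 rest

def find_relevant_column_py (question : String) (table : String) (schema_info : List (String × List String)) : String :=
  match schema_info.lookup table with
  | none => "*"     -- 'table not in schema_info'
  | some columns =>
    let question_lower := PySem.Str.lower question
    match pvALoop1 question_lower columns with
    | some col => col
    | none =>
      match pvALoop2 columns with
      | some col => col
      | none => match columns with
                | [] => "*"
                | c :: _ => c   -- columns[0]

-- ===== PORT B =====
-- 'def score(col): …' from Source B
def pvScore (ql : String) (col : String) : Nat :=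
  let cl := PySem.Str.lower col
  if PySem.Str.isIn cl ql then 0
  else if PySem.Str.isIn "name" cl then 1
  else 2

-- min(columns, key=score): fold keeping the current best and its key,
-- replacing only on a strictly smaller key (CPython's rule, first minimal wins)
def pvMinFold (ql : String) : List String → String × Nat → String × Nat
  | [], acc => acc
  | col :: rest, acc =>
      let s := pvScore ql col
      pvMinFold ql rest (if s < acc.2 then (col, s) else acc)

def find_relevant_column_py_alt (question : String) (table : String) (schema_info : List (String × List String)) : String :=
  match schema_info.lookup table with
  | none => "*"
  | some columns =>
    match columns with
    | [] => "*"
    | c :: rest =>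
      let ql := PySem.Str.lower question
      (pvMinFold ql rest (c, pvScore ql c)).1

-- ===== PRECONDITION & SPEC =====
def Spec_find_relevant_column_py (question : String) (table : String) (schema_info : List (String × List String)) (out : String) : Prop := out = find_relevant_column_py_alt question table schema_info
instance (question : String) (table : String) (schema_info : List (String × List String)) (out : String) : Decidable (Spec_find_relevant_column_py question table schema_info out) := by unfold Spec_find_relevant_column_py; infer_instance

-- ===== CLAIM (what is proved, stated in full; the proofs are below) =====
def Claim_equal_find_relevant_column_py : Prop := ∀ (question : String) (table : String) (schema_info : List (String × List String)), Dom_find_relevant_column_py question table schema_info → Spec_find_relevant_column_py question table schema_info (find_relevant_column_py question table schema_info)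

-- ===== LEMMAS AND PROOFS =====
-- A's core on a nonempty b :: rest, written as a function of the head and tail
def pvACore (ql : String) (b : String) (rest : List String) : String :=
  match pvALoop1 ql (b :: rest) with
  | some col => col
  | none =>
    match pvALoop2 (b :: rest) with
    | some col => col
    | none => b

-- min-with-key over rest starting from best b equals A's staged result on b :: rest
theorem pvMinFold_eq (ql : String) :
    ∀ (rest : List String) (b : String),
      (pvMinFold ql rest (b, pvScore ql b)).1 = pvACore ql b rest := by
  intro rest
  induction rest with
  | nil =>
      intro b
      by_cases h1 : PySem.Chars.isIn (PySem.Chars.lower b.toList) ql.toList <;>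
        by_cases h2 : PySem.Chars.isIn ['n','a','m','e'] (PySem.Chars.lower b.toList) <;>
          simp [pvMinFold, pvACore, pvALoop1, pvALoop2, PySem.Str.isIn, h1, h2]
  | cons col rest ih =>
      intro b
      by_cases h1 : PySem.Chars.isIn (PySem.Chars.lower b.toList) ql.toList <;>
        by_cases h2 : PySem.Chars.isIn ['n','a','m','e'] (PySem.Chars.lower b.toList) <;>
          by_cases g1 : PySem.Chars.isIn (PySem.Chars.lower col.toList) ql.toList <;>
            by_cases g2 : PySem.Chars.isIn ['n','a','m','e'] (PySem.Chars.lower col.toList) <;>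
              · have hcol := ih col
                have hb := ih b
                simp [pvScore, PySem.Str.isIn, h1, h2, g1, g2] at hcol hb
                simp [pvMinFold, pvScore, PySem.Str.isIn, h1, h2, g1, g2, hcol, hb,
                      pvACore, pvALoop1, pvALoop2]

-- ===== VERDICT (by name: the statement is the Claim_ definition above) =====
theorem find_relevant_column_py_spec : Claim_equal_find_relevant_column_py := by
  intro question table schema_info _
  unfold Spec_find_relevant_column_py find_relevant_column_py find_relevant_column_py_alt
  cases h : schema_info.lookup table with
  | none => rfl
  | some columns =>
      cases columns with
      | nil => rfl
      | cons c rest =>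
          simp only [pvMinFold_eq, pvACore, pvALoop1, pvALoop2]
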